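-- pv_equiv track=rewrite | github.com/cys4585/algorithm_study | swea/Advanced/구현3_탐욕알고리즘/swea_5203/swea_5203.py | is_run_or_triplet
-- ===== SOURCE A (Python) =====
-- def is_run_or_triplet(cards):
--     for i in range(len(cards)):
--         for j in range(i + 1, len(cards)):
--             for k in range(j + 1, len(cards)):
--                 # run
--                 if cards[i] == cards[j] == cards[k]:
--                     return True
--                 # triplet
--                 sorted_cards = sorted([cards[i], cards[j], cards[k]])
--                 if sorted_cards[1] == sorted_cards[0] + 1 and sorted_cards[2] == sorted_cards[1] + 1:
--                     return True
--     return False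
-- ===== SOURCE B (Python) =====
-- def is_run_or_triplet(cards):
--     values = set(cards)
--     for v in values:
--         if cards.count(v) >= 3 or (v + 1 in values and v + 2 in values):
--             return True
--     return False
-- ===== Notes on version B (the rewrite author's own statement) =====
-- stated objective: faster
-- what changed: Replaces the O(n^3) scan over all index triples (with an inner sort of each triple) by a single pass over the distinct values: build set(cards) once and report True iff some value occurs at least 3 times or some value v has v+1 and v+2 also present.
import Mathlib
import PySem

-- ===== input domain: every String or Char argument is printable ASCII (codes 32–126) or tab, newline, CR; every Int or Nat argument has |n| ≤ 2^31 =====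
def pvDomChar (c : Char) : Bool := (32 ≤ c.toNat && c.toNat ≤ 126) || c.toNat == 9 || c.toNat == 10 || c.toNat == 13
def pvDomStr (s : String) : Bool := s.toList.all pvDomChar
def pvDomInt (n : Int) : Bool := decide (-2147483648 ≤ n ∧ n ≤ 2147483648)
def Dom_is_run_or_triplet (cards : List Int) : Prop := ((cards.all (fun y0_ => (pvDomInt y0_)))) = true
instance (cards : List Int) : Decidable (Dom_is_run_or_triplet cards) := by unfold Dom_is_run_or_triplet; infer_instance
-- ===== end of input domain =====

-- B replaces A's scan over all index triples (sorting each triple) by one pass over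
-- set(cards): some value has count >= 3, or some v has v+1 and v+2 present.

-- ===== PORT A =====
-- body of A's innermost loop: the two checks on cards[i], cards[j], cards[k]
def pvTripBody (a b c : Int) : Bool :=
  if a = b ∧ b = c then true
  else
    let sorted_cards := PySem.List.sorted [a, b, c] (fun x => x) false
    decide (PySem.List.pyGetD sorted_cards 1 0 = PySem.List.pyGetD sorted_cards 0 0 + 1 ∧
            PySem.List.pyGetD sorted_cards 2 0 = PySem.List.pyGetD sorted_cards 1 0 + 1)

def is_run_or_triplet (cards : List Int) : Bool :=
  (PySem.List.pyRange 0 (cards.length : Int) 1).any fun i =>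
    (PySem.List.pyRange (i + 1) (cards.length : Int) 1).any fun j =>
      (PySem.List.pyRange (j + 1) (cards.length : Int) 1).any fun k =>
        pvTripBody (PySem.List.pyGetD cards i 0) (PySem.List.pyGetD cards j 0)
          (PySem.List.pyGetD cards k 0)

-- ===== PORT B =====
def is_run_or_triplet_alt (cards : List Int) : Bool :=
  let values := PySem.Set.ofList cards
  values.any fun v =>
    decide (3 ≤ PySem.List.count cards v) ||
      (PySem.Set.contains values (v + 1) && PySem.Set.contains values (v + 2))

-- ===== PRECONDITION & SPEC =====
def Spec_is_run_or_triplet (cards : List Int) (out : Bool) : Prop := out = is_run_or_triplet_alt cards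
instance (cards : List Int) (out : Bool) : Decidable (Spec_is_run_or_triplet cards out) := by unfold Spec_is_run_or_triplet; infer_instance

-- ===== CLAIM (what is proved, stated in full; the proofs are below) =====
def Claim_equal_is_run_or_triplet : Prop := ∀ (cards : List Int), Dom_is_run_or_triplet cards → Spec_is_run_or_triplet cards (is_run_or_triplet cards)

-- ===== LEMMAS AND PROOFS =====

-- A's per-triple test succeeds iff the three values are all equal or are a
-- permutation of three consecutive integers.
lemma pvTripBody_iff (a b c : Int) :
    pvTripBody a b c = true ↔
      (a = b ∧ b = c) ∨ ∃ m : Int, ([a, b, c] : List Int).Perm [m, m + 1, m + 2] := by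
  by_cases h : a = b ∧ b = c
  · simp [pvTripBody, h]
  · obtain ⟨p, q, r, hs⟩ : ∃ p q r : Int,
        PySem.List.sorted [a, b, c] (fun x => x) false = [p, q, r] := by
      apply List.length_eq_three.mp
      simp [PySem.List.length_sorted]
    have hperm : ([p, q, r] : List Int).Perm [a, b, c] := by
      rw [← hs]; exact PySem.List.sorted_perm [a, b, c] (fun x => x) false
    have hbody : pvTripBody a b c = decide (q = p + 1 ∧ r = q + 1) := by
      simp only [pvTripBody, if_neg h, hs]
      simp [PySem.List.pyGetD]
    rw [hbody, decide_eq_true_iff]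
    constructor
    · rintro ⟨rfl, rfl⟩
      refine Or.inr ⟨p, ?_⟩
      have h2 : p + 1 + 1 = p + 2 := by ring
      rw [← h2]
      exact hperm.symm
    · rintro (hct | ⟨m, hm⟩)
      · exact absurd hct h
      · have hmono : PySem.List.sorted [a, b, c] (fun x => x) = [m, m + 1, m + 2] :=
          PySem.List.sorted_eq_of_perm_of_pairwise_lt _ _ _ hm.symm
            (by simp [List.pairwise_cons])
        rw [hs] at hmono
        injection hmono with h1 hmono
        injection hmono with h2 hmono
        injection hmono with h3 _
        subst h1; subst h2; subst h3
        omega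

-- A returns True iff some length-3 sublist of cards passes the per-triple test.
lemma pvA_iff (cards : List Int) :
    is_run_or_triplet cards = true ↔
      ∃ a b c : Int, ([a, b, c] : List Int).Sublist cards ∧ pvTripBody a b c = true := by
  unfold is_run_or_triplet
  simp only [List.any_eq_true, PySem.List.mem_pyRange_one]
  constructor
  · rintro ⟨i, ⟨hi0, hin⟩, j, ⟨hj0, hjn⟩, k, ⟨hk0, hkn⟩, hbody⟩
    have hi : i < (cards.length : Int) := by omega
    have hj : j < (cards.length : Int) := by omega
    rw [PySem.List.pyGetD_eq_getElem cards 0 (by omega) hi,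
        PySem.List.pyGetD_eq_getElem cards 0 (by omega) hj,
        PySem.List.pyGetD_eq_getElem cards 0 (by omega) hkn] at hbody
    refine ⟨_, _, _, ?_, hbody⟩
    have hpw : List.Pairwise (· < ·)
        ([⟨i.toNat, by omega⟩, ⟨j.toNat, by omega⟩, ⟨k.toNat, by omega⟩] :
          List (Fin cards.length)) := by
      refine List.pairwise_cons.mpr ⟨?_, List.pairwise_cons.mpr ⟨?_, List.pairwise_singleton _ _⟩⟩
      · intro a' ha'
        simp only [List.mem_cons, List.not_mem_nil, or_false] at ha'
        rcases ha' with rfl | rfl <;> (rw [Fin.mk_lt_mk]; omega)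
      · intro a' ha'
        simp only [List.mem_singleton] at ha'
        subst ha'
        rw [Fin.mk_lt_mk]; omega
    have hsub := List.map_getElem_sublist hpw
    simpa using hsub
  · rintro ⟨a, b, c, hsub, htrip⟩
    obtain ⟨is, heq, hpw⟩ := List.sublist_eq_map_getElem hsub
    have hlen : is.length = 3 := by
      have := congrArg List.length heq
      simpa using this.symm
    obtain ⟨i, j, k, rfl⟩ := List.length_eq_three.mp hlen
    simp only [List.map_cons, List.map_nil, List.cons.injEq, and_true] at heq
    obtain ⟨ha, hb, hc⟩ := heq
    subst ha; subst hb; subst hc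
    have hij : (i : Nat) < (j : Nat) :=
      Fin.lt_def.mp ((List.pairwise_cons.mp hpw).1 j (by simp))
    have hjk : (j : Nat) < (k : Nat) :=
      Fin.lt_def.mp ((List.pairwise_cons.mp (List.pairwise_cons.mp hpw).2).1 k (by simp))
    refine ⟨((i : Nat) : Int), ⟨by omega, by exact_mod_cast i.isLt⟩,
            ((j : Nat) : Int), ⟨by omega, by exact_mod_cast j.isLt⟩,
            ((k : Nat) : Int), ⟨by omega, by exact_mod_cast k.isLt⟩, ?_⟩
    rw [PySem.List.pyGetD_natCast, PySem.List.pyGetD_natCast, PySem.List.pyGetD_natCast,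
        List.getD_eq_getElem cards 0 i.isLt, List.getD_eq_getElem cards 0 j.isLt,
        List.getD_eq_getElem cards 0 k.isLt]
    simpa [Fin.getElem_fin] using htrip

-- B returns True iff some value of cards has count >= 3 or starts a run v, v+1, v+2.
lemma pvB_iff (cards : List Int) :
    is_run_or_triplet_alt cards = true ↔
      ∃ v ∈ cards, 3 ≤ List.count v cards ∨ ((v + 1) ∈ cards ∧ (v + 2) ∈ cards) := by
  unfold is_run_or_triplet_alt
  simp only [List.any_eq_true, PySem.Set.contains_iff, PySem.Set.mem_ofList, PySem.List.count_eq,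
    Bool.or_eq_true, Bool.and_eq_true, decide_eq_true_iff]

-- The two characterizations agree.
lemma pvBridge (cards : List Int) :
    (∃ a b c : Int, ([a, b, c] : List Int).Sublist cards ∧ pvTripBody a b c = true) ↔
      ∃ v ∈ cards, 3 ≤ List.count v cards ∨ ((v + 1) ∈ cards ∧ (v + 2) ∈ cards) := by
  constructor
  · rintro ⟨a, b, c, hsub, htrip⟩
    rcases (pvTripBody_iff a b c).mp htrip with ⟨rfl, rfl⟩ | ⟨m, hm⟩
    · refine ⟨a, hsub.subset (by simp), Or.inl ?_⟩
      exact List.replicate_sublist_iff.mp (by simpa [List.replicate] using hsub)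
    · refine ⟨m, ?_, Or.inr ⟨?_, ?_⟩⟩ <;>
        · apply hsub.subset
          rw [hm.mem_iff]
          simp
  · rintro ⟨v, hv, hcount | ⟨h1, h2⟩⟩
    · refine ⟨v, v, v, ?_, by simp [pvTripBody]⟩
      simpa [List.replicate] using List.replicate_sublist_iff.mpr hcount
    · have hnodup : ([v, v + 1, v + 2] : List Int).Nodup := by
        refine List.nodup_cons.mpr ⟨?_, List.nodup_cons.mpr ⟨?_, List.nodup_singleton _⟩⟩
        · intro hmem
          simp only [List.mem_cons, List.not_mem_nil, or_false] at hmem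
          omega
        · intro hmem
          simp only [List.mem_cons, List.not_mem_nil, or_false] at hmem
          omega
      have hsubset : ([v, v + 1, v + 2] : List Int) ⊆ cards := by
        intro x hx
        simp only [List.mem_cons, List.not_mem_nil, or_false] at hx
        rcases hx with rfl | rfl | rfl <;> assumption
      obtain ⟨l, hlp, hls⟩ := hnodup.subperm hsubset
      have hl3 : l.length = 3 := by rw [hlp.length_eq]; rfl
      obtain ⟨a, b, c, rfl⟩ := List.length_eq_three.mp hl3
      exact ⟨a, b, c, hls, (pvTripBody_iff a b c).mpr (Or.inr ⟨v, hlp⟩)⟩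

-- ===== VERDICT (by name: the statement is the Claim_ definition above) =====
theorem is_run_or_triplet_spec : Claim_equal_is_run_or_triplet := by
  intro cards _
  unfold Spec_is_run_or_triplet
  rw [Bool.eq_iff_iff, pvA_iff, pvB_iff]
  exact pvBridge cards
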